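-- pv_equiv track=rewrite | github.com/BrunoVerne/EjerciciosAlgoritmos | ProgramacionDInamica/hacker.py | hacker
-- ===== SOURCE A (Python) =====
-- def hacker(palabra, diccionario):
--     n = len(palabra)
--     OPT = [False] * (n+1)
--     OPT[0] = True
--     posibles_resultados = []
--     for i in range(1,n+1):
--         for j in range(i):
--             if OPT[j] == True and palabra[j:i] in diccionario:
--                 OPT[i] = True
--                 posibles_resultados.append(palabra[j:i])
--                 break
--
--     return (OPT[len(palabra)], posibles_resultados)
-- ===== SOURCE B (Python) =====
-- def hacker(palabra, diccionario):
--     # Forward relaxation: from each reachable position j, follow each dictionary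
--     # word that starts there, recording the matched piece the first time a
--     # position becomes reachable; then reconstruct the result list in a second pass.
--     n = len(palabra)
--     alcanzable = [False] * (n + 1)
--     alcanzable[0] = True
--     pieza = [""] * (n + 1)
--     for j in range(n + 1):
--         if alcanzable[j]:
--             for w in diccionario:
--                 i = j + len(w)
--                 if i <= n and not alcanzable[i] and palabra[j:i] == w:
--                     alcanzable[i] = True
--                     pieza[i] = w
--     return (alcanzable[n], [pieza[i] for i in range(1, n + 1) if alcanzable[i]])
-- ===== Notes on version B (the rewrite author's own statement) =====
-- stated objective: faster
-- what changed: B replaces A's backward scan over all split points j for every end index i (with a list-membership test of each substring) by a forward relaxation: from each reachable position j it tries every dictionary word starting there and records the matched piece the first time a position becomes reachable, then reconstructs the result list in a separate second pass.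
import Mathlib
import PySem

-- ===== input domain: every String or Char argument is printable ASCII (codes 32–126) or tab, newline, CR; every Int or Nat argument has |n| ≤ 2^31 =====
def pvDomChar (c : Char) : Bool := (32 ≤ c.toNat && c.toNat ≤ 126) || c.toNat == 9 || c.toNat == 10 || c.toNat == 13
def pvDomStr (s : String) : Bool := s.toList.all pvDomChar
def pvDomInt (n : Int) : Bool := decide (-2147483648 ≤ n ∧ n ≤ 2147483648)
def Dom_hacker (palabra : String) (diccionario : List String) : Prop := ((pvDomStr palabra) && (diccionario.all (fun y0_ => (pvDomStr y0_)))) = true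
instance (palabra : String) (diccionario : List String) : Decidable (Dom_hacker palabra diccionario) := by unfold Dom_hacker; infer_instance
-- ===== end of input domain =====

-- B replaces A's backward scan over all split points j for each end i by a forward
-- relaxation: from each reachable position j it follows every dictionary word that
-- starts there, recording the matched piece the first time a position becomes
-- reachable, and reconstructs the result list in a separate second pass.

-- palabra[j:i] for Nat bounds (thin wrapper over the PySem slice; used by both ports)
def pySubstr (palabra : String) (j i : Nat) : String :=
  PySem.Str.slice palabra (some (j : Int)) (some (i : Int))

-- ===== PORT A =====
-- inner 'for j in range(i): … break' of A: the first match updates OPT, appends, and breaks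
def hackerInnerA (palabra : String) (diccionario : List String) (i : Nat)
    (OPT : List Bool) (res : List String) : List Nat → List Bool × List String
  | [] => (OPT, res)
  | j :: js =>
      if (OPT.getD j false == true) && diccionario.contains (pySubstr palabra j i) then
        (OPT.set i true, res ++ [pySubstr palabra j i])
      else hackerInnerA palabra diccionario i OPT res js

def hacker (palabra : String) (diccionario : List String) : Bool × List String :=
  let n := palabra.toList.length
  let fin := (List.range' 1 n).foldl
    (fun st i => hackerInnerA palabra diccionario i st.1 st.2 (List.range i))
    ((List.replicate (n + 1) false).set 0 true, [])
  (fin.1.getD n false, fin.2)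

-- ===== PORT B =====
-- B's inner 'for w in diccionario': relax the edge j -> j+len(w) when w starts at j
def hackerRelaxB (palabra : String) (n j : Nat)
    (st : List Bool × List String) (w : String) : List Bool × List String :=
  let i := j + w.toList.length
  if decide (i ≤ n) && !(st.1.getD i false) && (pySubstr palabra j i == w) then
    (st.1.set i true, st.2.set i w)
  else st

def hacker_alt (palabra : String) (diccionario : List String) : Bool × List String :=
  let n := palabra.toList.length
  let fin := (List.range (n + 1)).foldl
    (fun st j => if st.1.getD j false then diccionario.foldl (hackerRelaxB palabra n j) st else st)
    ((List.replicate (n + 1) false).set 0 true, List.replicate (n + 1) "")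
  (fin.1.getD n false,
   (List.range' 1 n).filterMap (fun i =>
     if fin.1.getD i false then some (fin.2.getD i "") else none))

-- ===== PRECONDITION & SPEC =====
def Spec_hacker (palabra : String) (diccionario : List String) (out : Bool × List String) : Prop := out = hacker_alt palabra diccionario
instance (palabra : String) (diccionario : List String) (out : Bool × List String) : Decidable (Spec_hacker palabra diccionario out) := by unfold Spec_hacker; infer_instance

-- ===== CLAIM (what is proved, stated in full; the proofs are below) =====
def Claim_equal_hacker : Prop := ∀ (palabra : String) (diccionario : List String), Dom_hacker palabra diccionario → Spec_hacker palabra diccionario (hacker palabra diccionario)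

-- ===== LEMMAS AND PROOFS =====

-- the word-break reachability predicate both programs compute
def wSpec (p : String) (d : List String) : Nat → Bool
  | 0 => true
  | (i+1) => (List.range (i+1)).attach.any
      (fun j => wSpec p d j.1 && d.contains (pySubstr p j.1 (i+1)))
decreasing_by exact List.mem_range.mp j.2

-- 'split point j works for end i'
def validJ (p : String) (d : List String) (i j : Nat) : Bool :=
  wSpec p d j && d.contains (pySubstr p j i)

theorem wSpec_succ (p : String) (d : List String) (i : Nat) :
    wSpec p d (i+1) = (List.range (i+1)).any (validJ p d (i+1)) := by
  rw [wSpec]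
  refine Bool.eq_iff_iff.mpr ?_
  simp only [validJ, List.any_eq_true, List.mem_attach, true_and, Subtype.exists,
    List.mem_range, exists_prop]

-- first valid split point for end i (0 if none)
def Jmin (p : String) (d : List String) (i : Nat) : Nat :=
  ((List.range i).find? (validJ p d i)).getD 0

-- A's outer fold, named (definitionally the fold inside `hacker`)
def foldA (p : String) (d : List String) (k : Nat) : List Bool × List String :=
  (List.range' 1 k).foldl
    (fun st i => hackerInnerA p d i st.1 st.2 (List.range i))
    ((List.replicate (p.toList.length + 1) false).set 0 true, [])

-- B's outer fold, named (definitionally the fold inside `hacker_alt`)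
def foldB (p : String) (d : List String) (m : Nat) : List Bool × List String :=
  (List.range m).foldl
    (fun st j => if st.1.getD j false then d.foldl (hackerRelaxB p p.toList.length j) st else st)
    ((List.replicate (p.toList.length + 1) false).set 0 true,
     List.replicate (p.toList.length + 1) "")


-- generic getD/set facts
theorem getD_set_ne' {α : Type} (l : List α) (i j : Nat) (a d : α) (h : i ≠ j) :
    (l.set i a).getD j d = l.getD j d := by
  rw [List.getD_eq_getElem?_getD, List.getElem?_set_ne h, ← List.getD_eq_getElem?_getD]

theorem getD_set_self' {α : Type} (l : List α) (i : Nat) (a d : α) (h : i < l.length) :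
    (l.set i a).getD i d = a := by
  rw [List.getD_eq_getElem?_getD, List.getElem?_set_self h]
  rfl

-- entries above index 0 of the initial table are false
theorem init_getD_false (n m : Nat) (hm : 0 < m) :
    ((List.replicate (n + 1) false).set 0 true).getD m false = false := by
  rcases Nat.lt_or_ge m (n + 1) with h | h
  · rw [List.getD_eq_getElem?_getD, List.getElem?_set_ne (by omega), List.getElem?_replicate]
    simp [h]
  · rw [List.getD_eq_getElem?_getD, List.getElem?_eq_none_iff.mpr (by simp; omega)]
    rfl

-- the length of palabra[j:i] for i ≤ n is i - j
theorem pySubstr_length (palabra : String) (j i : Nat) (hin : i ≤ palabra.toList.length) :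
    (pySubstr palabra j i).toList.length = i - j := by
  simp only [pySubstr, PySem.Str.slice, PySem.Chars.slice_eq_listSlice, String.toList_ofList,
    PySem.List.slice_natCast, List.length_take, List.length_drop]
  omega

-- A's first-match predicate
def hackerQ (p : String) (d : List String) (i : Nat) (OPT : List Bool) (j : Nat) : Bool :=
  OPT.getD j false && d.contains (pySubstr p j i)

-- A's inner loop is the first match of hackerQ
theorem hackerInnerA_eq (palabra : String) (diccionario : List String) (i : Nat)
    (OPT : List Bool) (res : List String) (js : List Nat) :
    hackerInnerA palabra diccionario i OPT res js =
      match js.find? (hackerQ palabra diccionario i OPT) with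
      | some j => (OPT.set i true, res ++ [pySubstr palabra j i])
      | none => (OPT, res) := by
  induction js with
  | nil => rfl
  | cons j js ih =>
    cases hb : hackerQ palabra diccionario i OPT j with
    | true =>
      have hb' : (OPT.getD j false && diccionario.contains (pySubstr palabra j i)) = true := hb
      rw [List.find?_cons, hb]
      show (if ((OPT.getD j false == true) && diccionario.contains (pySubstr palabra j i)) = true
            then (OPT.set i true, res ++ [pySubstr palabra j i])
            else hackerInnerA palabra diccionario i OPT res js) = _
      rw [show (OPT.getD j false == true) = OPT.getD j false from by
        cases OPT.getD j false <;> rfl, hb']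
      rfl
    | false =>
      have hb' : (OPT.getD j false && diccionario.contains (pySubstr palabra j i)) = false := hb
      rw [List.find?_cons, hb]
      show (if ((OPT.getD j false == true) && diccionario.contains (pySubstr palabra j i)) = true
            then (OPT.set i true, res ++ [pySubstr palabra j i])
            else hackerInnerA palabra diccionario i OPT res js) = _
      rw [show (OPT.getD j false == true) = OPT.getD j false from by
        cases OPT.getD j false <;> rfl, hb']
      simpa using ih

-- find? only looks at the predicate on members
theorem find?_congr_mem {α : Type} (l : List α) (p q : α → Bool)
    (h : ∀ x ∈ l, p x = q x) : l.find? p = l.find? q := by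
  induction l with
  | nil => rfl
  | cons x xs ih =>
    rw [List.find?_cons, List.find?_cons, h x List.mem_cons_self]
    cases q x with
    | true => rfl
    | false => exact ih (fun y hy => h y (List.mem_cons_of_mem x hy))

-- wSpec at a positive index, phrased through the existence of a valid split point
theorem wSpec_eq_true_iff (p : String) (d : List String) (k : Nat) :
    wSpec p d (k+1) = true ↔ ∃ j, j < k+1 ∧ validJ p d (k+1) j = true := by
  rw [wSpec_succ]
  simp [List.any_eq_true, List.mem_range]

-- A's loop invariant
theorem foldA_inv (p : String) (d : List String) (k : Nat) (hk : k ≤ p.toList.length) :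
    (foldA p d k).1.length = p.toList.length + 1 ∧
    (∀ i, (foldA p d k).1.getD i false
        = ((i == 0) || (decide (1 ≤ i ∧ i ≤ k) && wSpec p d i))) ∧
    (foldA p d k).2 = (List.range' 1 k).filterMap
      (fun i => if wSpec p d i then some (pySubstr p (Jmin p d i) i) else none) := by
  induction k with
  | zero =>
    refine ⟨by simp [foldA], ?_, by simp [foldA]⟩
    intro i
    match i with
    | 0 =>
      have h0 : (foldA p d 0).1 = (List.replicate (p.toList.length + 1) false).set 0 true := rfl
      rw [h0, getD_set_self' _ 0 true false (by simp)]
      simp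
    | (m+1) =>
      have h0 : (foldA p d 0).1 = (List.replicate (p.toList.length + 1) false).set 0 true := rfl
      rw [h0, init_getD_false p.toList.length (m+1) (by omega)]
      simp
  | succ k ih =>
    obtain ⟨h1, h2, h3⟩ := ih (by omega)
    have hrange : List.range' 1 (k + 1) = List.range' 1 k ++ [1 + k] := by
      have h := @List.range'_concat 1 1 k
      rwa [one_mul] at h
    have hstep : foldA p d (k + 1) =
        hackerInnerA p d (1 + k) (foldA p d k).1 (foldA p d k).2 (List.range (1 + k)) := by
      rw [foldA, hrange, List.foldl_append]; rfl
    have hpred : ∀ j ∈ List.range (1 + k),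
        hackerQ p d (1 + k) (foldA p d k).1 j = validJ p d (1 + k) j := by
      intro j hj
      have hjk : j ≤ k := by have := List.mem_range.mp hj; omega
      rw [hackerQ, validJ, h2 j]
      match j with
      | 0 => simp [wSpec]
      | (m+1) => simp [show 1 ≤ m+1 ∧ m+1 ≤ k from ⟨by omega, hjk⟩]
    rw [hstep, hackerInnerA_eq, find?_congr_mem _ _ _ hpred]
    have hik : (1 + k) = k + 1 := by omega
    cases hF : (List.range (1 + k)).find? (validJ p d (1 + k)) with
    | none =>
      have hw : wSpec p d (k+1) = false := by
        rcases hw' : wSpec p d (k+1) with _ | _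
        · rfl
        · obtain ⟨j, hj1, hj2⟩ := (wSpec_eq_true_iff p d k).mp hw'
          have := List.find?_eq_none.mp hF j (by rw [hik]; exact List.mem_range.mpr hj1)
          rw [hik] at this; exact absurd hj2 this
      dsimp only
      refine ⟨h1, ?_, ?_⟩
      · intro i
        rw [h2 i]
        by_cases hi : i = k + 1
        · subst hi; simp [hw]
        · by_cases hle : 1 ≤ i ∧ i ≤ k
          · simp [show (1 ≤ i ∧ i ≤ k+1) from ⟨hle.1, by omega⟩, hle]
          · simp [show ¬(1 ≤ i ∧ i ≤ k+1) from by omega, hle]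
      · rw [h3, hrange, List.filterMap_append]
        rw [hik] at *
        simp [hw]
    | some j =>
      have hjval : validJ p d (1 + k) j = true := List.find?_some hF
      have hjmem : j < 1 + k := List.mem_range.mp (List.mem_of_find?_eq_some hF)
      have hw : wSpec p d (k+1) = true := by
        rw [wSpec_eq_true_iff]
        exact ⟨j, by omega, by rwa [hik] at hjval⟩
      have hJmin : Jmin p d (k+1) = j := by
        rw [Jmin, ← hik, hF]; rfl
      have hlen : 1 + k < (foldA p d k).1.length := by omega
      dsimp only
      refine ⟨by simpa using h1, ?_, ?_⟩
      · intro i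
        by_cases hi : i = 1 + k
        · subst hi
          rw [getD_set_self' _ _ _ _ hlen]
          simp [hik, hw]
        · rw [getD_set_ne' _ _ _ _ _ (fun h => hi h.symm), h2 i]
          by_cases hle : 1 ≤ i ∧ i ≤ k
          · simp [show (1 ≤ i ∧ i ≤ k+1) from ⟨hle.1, by omega⟩, hle]
          · simp [show ¬(1 ≤ i ∧ i ≤ k+1) from by omega, hle]
      · rw [h3, hrange, List.filterMap_append]
        rw [hik] at *
        simp [hw, hJmin]

-- a matching word starting at j must end exactly at j + its length
theorem match_end (p : String) (j i : Nat) (w : String)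
    (hin : i ≤ p.toList.length) (hji : j < i) (hs : pySubstr p j i = w) :
    i = j + w.toList.length := by
  have := pySubstr_length p j i hin
  rw [hs] at this
  omega

-- B's inner relaxation loop, characterised
theorem relaxB_inv (p : String) (j : Nat) (ws : List String) (st : List Bool × List String)
    (h1 : st.1.length = p.toList.length + 1) (h2 : st.2.length = p.toList.length + 1)
    (hj : st.1.getD j false = true) :
    (ws.foldl (hackerRelaxB p p.toList.length j) st).1.length = p.toList.length + 1 ∧
    (ws.foldl (hackerRelaxB p p.toList.length j) st).2.length = p.toList.length + 1 ∧
    (∀ i, (ws.foldl (hackerRelaxB p p.toList.length j) st).1.getD i false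
        = (st.1.getD i false
            || decide (j < i ∧ i ≤ p.toList.length ∧ pySubstr p j i ∈ ws))) ∧
    (∀ i, (ws.foldl (hackerRelaxB p p.toList.length j) st).2.getD i ""
        = if st.1.getD i false = false ∧ j < i ∧ i ≤ p.toList.length ∧ pySubstr p j i ∈ ws
          then pySubstr p j i else st.2.getD i "") := by
  induction ws generalizing st with
  | nil =>
    refine ⟨h1, h2, ?_, ?_⟩ <;> intro i <;> simp
  | cons w ws ih =>
    rw [List.foldl_cons]
    rcases hc : (decide (j + w.toList.length ≤ p.toList.length)
        && !(st.1.getD (j + w.toList.length) false)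
        && (pySubstr p j (j + w.toList.length) == w)) with _ | _
    · -- no relaxation by w
      have hst' : hackerRelaxB p p.toList.length j st w = st := by
        rw [hackerRelaxB]; simp only [hc]; rfl
      rw [hst']
      obtain ⟨g1, g2, g3, g4⟩ := ih st h1 h2 hj
      -- w cannot match any i either
      have hkey : ∀ i, (j < i ∧ i ≤ p.toList.length ∧ pySubstr p j i = w) →
          st.1.getD i false = true := by
        intro i ⟨hji, hin, hs⟩
        have hi0 : i = j + w.toList.length := match_end p j i w hin hji hs
        simp only [Bool.and_eq_false_iff, decide_eq_false_iff_not, beq_eq_false_iff_ne,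
          Bool.not_eq_eq_eq_not, Bool.not_false] at hc
        rcases hc with (hc | hc) | hc
        · exact absurd (hi0 ▸ hin) hc
        · rwa [← hi0] at hc
        · rw [hi0] at hs; exact absurd hs hc
      refine ⟨g1, g2, ?_, ?_⟩
      · intro i
        rw [g3 i]
        by_cases hm : j < i ∧ i ≤ p.toList.length ∧ pySubstr p j i = w
        · rw [hkey i hm]; simp
        · congr 1
          simp only [decide_eq_decide, List.mem_cons]
          constructor
          · rintro ⟨a, b, c⟩; exact ⟨a, b, Or.inr c⟩
          · rintro ⟨a, b, c⟩; exact ⟨a, b, c.resolve_left (fun h => hm ⟨a, b, h⟩)⟩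
      · intro i
        rw [g4 i]
        by_cases hm : j < i ∧ i ≤ p.toList.length ∧ pySubstr p j i = w
        · rw [hkey i hm]; simp
        · congr 1
          · simp only [eq_iff_iff, List.mem_cons]
            constructor
            · rintro ⟨a, b, c, e⟩; exact ⟨a, b, c, Or.inr e⟩
            · rintro ⟨a, b, c, e⟩; exact ⟨a, b, c, e.resolve_left (fun h => hm ⟨b, c, h⟩)⟩
    · -- w relaxes the edge j -> i0
      simp only [Bool.and_eq_true, decide_eq_true_eq, Bool.not_eq_eq_eq_not, Bool.not_true,
        beq_iff_eq] at hc
      obtain ⟨⟨hin0, hfalse0⟩, hsub0⟩ := hc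
      have hji0 : j < j + w.toList.length := by
        rcases Nat.eq_zero_or_pos w.toList.length with h0 | h0
        · exfalso
          rw [show j + w.toList.length = j from by omega] at hfalse0
          rw [hj] at hfalse0; exact Bool.true_eq_false.mp hfalse0
        · omega
      set i0 := j + w.toList.length with hi0def
      have hst' : hackerRelaxB p p.toList.length j st w
          = (st.1.set i0 true, st.2.set i0 w) := by
        rw [hackerRelaxB]
        simp only [← hi0def, hin0, hfalse0, hsub0, decide_true, beq_self_eq_true,
          Bool.not_false, Bool.and_self]
        rfl
      rw [hst']
      have hj' : ((st.1.set i0 true, st.2.set i0 w) : List Bool × List String).1.getD j false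
          = true := by
        show (st.1.set i0 true).getD j false = true
        rw [getD_set_ne' _ _ _ _ _ (by omega), hj]
      obtain ⟨g1, g2, g3, g4⟩ := ih (st.1.set i0 true, st.2.set i0 w)
        (by simpa using h1) (by simpa using h2) hj'
      have hlen1 : i0 < st.1.length := by omega
      have hlen2 : i0 < st.2.length := by omega
      -- a later i matching w coincides with i0
      have huni : ∀ i, j < i → i ≤ p.toList.length → pySubstr p j i = w → i = i0 :=
        fun i hji hin hs => match_end p j i w hin hji hs
      refine ⟨g1, g2, ?_, ?_⟩
      · intro i
        rw [g3 i]
        by_cases hi : i = i0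
        · subst hi
          rw [getD_set_self' _ _ _ _ hlen1, hfalse0, Bool.true_or, Bool.false_or,
            eq_comm, decide_eq_true_eq]
          exact ⟨hji0, hin0, by rw [hsub0]; exact List.mem_cons_self⟩
        · rw [getD_set_ne' _ _ _ _ _ (fun h => hi h.symm)]
          congr 1
          simp only [decide_eq_decide, List.mem_cons]
          constructor
          · rintro ⟨a, b, c⟩; exact ⟨a, b, Or.inr c⟩
          · rintro ⟨a, b, c⟩
            exact ⟨a, b, c.resolve_left (fun h => hi (huni i a b h))⟩
      · intro i
        rw [g4 i]
        by_cases hi : i = i0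
        · subst hi
          rw [getD_set_self' _ _ _ _ hlen1, getD_set_self' _ _ _ _ hlen2,
            if_neg (by rintro ⟨hf, -⟩; exact absurd hf (by simp)),
            if_pos ⟨hfalse0, hji0, hin0, by rw [hsub0]; exact List.mem_cons_self⟩]
          exact hsub0.symm
        · rw [getD_set_ne' _ _ _ _ _ (fun h => hi h.symm),
            getD_set_ne' _ _ _ _ _ (fun h => hi h.symm)]
          congr 1
          simp only [eq_iff_iff, List.mem_cons]
          constructor
          · rintro ⟨a, b, c, e⟩; exact ⟨a, b, c, Or.inr e⟩
          · rintro ⟨a, b, c, e⟩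
            exact ⟨a, b, c, e.resolve_left (fun h => hi (huni i b c h))⟩

-- B's table value after processing sources 0..m-1
def RB (p : String) (d : List String) (m i : Nat) : Bool :=
  (i == 0) || decide (i ≤ p.toList.length ∧ ∃ j, j < m ∧ j < i ∧ validJ p d i j = true)

-- B's loop invariant
theorem foldB_inv (p : String) (d : List String) (m : Nat) (hm : m ≤ p.toList.length + 1) :
    (foldB p d m).1.length = p.toList.length + 1 ∧
    (foldB p d m).2.length = p.toList.length + 1 ∧
    (∀ i, (foldB p d m).1.getD i false = RB p d m i) ∧
    (∀ i, 1 ≤ i → (foldB p d m).1.getD i false = true →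
      (foldB p d m).2.getD i "" = pySubstr p (Jmin p d i) i) := by
  induction m with
  | zero =>
    refine ⟨by simp [foldB], by simp [foldB], ?_, ?_⟩
    · intro i
      match i with
      | 0 =>
        have h0 : (foldB p d 0).1 = (List.replicate (p.toList.length + 1) false).set 0 true := rfl
        rw [h0, getD_set_self' _ 0 true false (by simp)]
        simp [RB]
      | (k+1) =>
        have h0 : (foldB p d 0).1 = (List.replicate (p.toList.length + 1) false).set 0 true := rfl
        rw [h0, init_getD_false p.toList.length (k+1) (by omega)]
        simp [RB]
    · intro i h1 h2
      match i with
      | (k+1) =>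
        rw [show (foldB p d 0).1 = (List.replicate (p.toList.length + 1) false).set 0 true
          from rfl, init_getD_false p.toList.length (k+1) (by omega)] at h2
        exact absurd h2 (by simp)
  | succ m ih =>
    obtain ⟨h1, h2, h3, h4⟩ := ih (by omega)
    have hmn : m ≤ p.toList.length := by omega
    have hstep : foldB p d (m + 1) =
        (if (foldB p d m).1.getD m false
          then d.foldl (hackerRelaxB p p.toList.length m) (foldB p d m)
          else foldB p d m) := by
      rw [foldB, List.range_succ, List.foldl_append]; rfl
    -- the table entry at the source being processed is the final reachability value
    have hsrc : (foldB p d m).1.getD m false = wSpec p d m := by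
      rw [h3 m, RB]
      match m, hmn with
      | 0, _ => simp [wSpec]
      | (k+1), hmn =>
        rw [show ((k+1:Nat) == 0) = false from by simp, Bool.false_or]
        rcases hw : wSpec p d (k+1) with _ | _
        · simp only [decide_eq_false_iff_not]
          rintro ⟨-, j, hj1, hj2, hj3⟩
          obtain ⟨jj, hjj⟩ := (wSpec_eq_true_iff p d k).mpr ⟨j, hj2, hj3⟩ |> fun h =>
            (⟨0, by rw [h] at hw; exact absurd hw (by simp)⟩ : ∃ _ : Nat, False)
          exact hjj
        · simp only [decide_eq_true_eq]
          obtain ⟨j, hj1, hj2⟩ := (wSpec_eq_true_iff p d k).mp hw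
          exact ⟨by omega, j, by omega, hj1, hj2⟩
    by_cases hw : wSpec p d m = true
    · rw [hw] at hsrc
      rw [hstep, hsrc, if_pos rfl]
      obtain ⟨g1, g2, g3, g4⟩ := relaxB_inv p m d (foldB p d m) h1 h2 hsrc
      refine ⟨g1, g2, ?_, ?_⟩
      · intro i
        rw [g3 i, h3 i, RB, RB]
        match i with
        | 0 => simp
        | (k+1) =>
          rw [show ((k+1:Nat) == 0) = false from by simp, Bool.false_or]
          rcases Decidable.em (k+1 ≤ p.toList.length ∧ ∃ j, j < m ∧ j < k+1 ∧
              validJ p d (k+1) j = true) with hold | hold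
          · rw [decide_eq_true hold, Bool.true_or, eq_comm, Bool.false_or,
              decide_eq_true_eq]
            exact ⟨hold.1, hold.2.choose, by omega, hold.2.choose_spec.2.1,
              hold.2.choose_spec.2.2⟩
          · rw [decide_eq_false hold, Bool.false_or]
            refine decide_eq_decide.mpr ?_
            constructor
            · rintro ⟨a, b, c⟩
              exact ⟨b, m, by omega, a, by rw [validJ, hw, Bool.true_and,
                List.contains_eq_mem, decide_eq_true_eq]; exact c⟩
            · rintro ⟨a, j, hj1, hj2, hj3⟩
              rcases Nat.lt_or_ge j m with hjm | hjm
              · exact absurd ⟨a, j, hjm, hj2, hj3⟩ hold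
              · have hjem : j = m := by omega
                subst hjem
                rw [validJ, hw, Bool.true_and, List.contains_eq_mem,
                  decide_eq_true_eq] at hj3
                exact ⟨hj2, a, hj3⟩
      · intro i hi1 hi2
        rw [g3 i] at hi2
        rcases hold : (foldB p d m).1.getD i false with _ | _
        · -- newly reached via source m
          rw [hold, Bool.false_or, decide_eq_true_eq] at hi2
          obtain ⟨hmi, hin, hmem⟩ := hi2
          rw [g4 i, if_pos ⟨hold, hmi, hin, hmem⟩]
          -- Jmin i = m : m is valid, and no smaller split point is
          have hvm : validJ p d i m = true := by
            rw [validJ, hw, Bool.true_and, List.contains_eq_mem, decide_eq_true_eq]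
            exact hmem
          have hnone : ∀ j, j < m → validJ p d i j = false := by
            intro j hjm
            rcases hvj : validJ p d i j with _ | _
            · rfl
            · exfalso
              have : RB p d m i = true := by
                rw [RB]
                match i, hi1 with
                | (k+1), _ =>
                  rw [show ((k+1:Nat) == 0) = false from by simp, Bool.false_or,
                    decide_eq_true_eq]
                  exact ⟨hin, j, hjm, by omega, hvj⟩
              rw [h3 i, this] at hold
              exact absurd hold (by simp)
          have : (List.range i).find? (validJ p d i) = some m :=
            List.find?_range_eq_some.mpr ⟨hvm, List.mem_range.mpr hmi, fun j hj =>
              by rw [hnone j hj]; rfl⟩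
          rw [Jmin, this]
          rfl
        · rw [g4 i]
          rw [if_neg (by rintro ⟨hf, -⟩; rw [hold] at hf; exact Bool.true_eq_false.mp hf)]
          exact h4 i hi1 hold
    · have hwf : wSpec p d m = false := by rcases h : wSpec p d m with _|_; rfl; exact absurd h hw
      rw [hwf] at hsrc
      rw [hstep, hsrc, if_neg (by simp)]
      refine ⟨h1, h2, ?_, h4⟩
      intro i
      rw [h3 i, RB, RB]
      congr 1
      simp only [decide_eq_decide]
      constructor
      · rintro ⟨a, j, hj1, hj2, hj3⟩; exact ⟨a, j, by omega, hj2, hj3⟩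
      · rintro ⟨a, j, hj1, hj2, hj3⟩
        rcases Nat.lt_or_ge j m with hjm | hjm
        · exact ⟨a, j, hjm, hj2, hj3⟩
        · have : j = m := by omega
          subst this
          rw [validJ, hwf, Bool.false_and] at hj3
          exact absurd hj3 (by simp)

-- the table entry at the full length, simplified
theorem edge_case_wSpec (p : String) (d : List String) (n : Nat) :
    ((n == 0) || (decide (1 ≤ n ∧ n ≤ n) && wSpec p d n)) = wSpec p d n := by
  match n with
  | 0 => simp [wSpec]
  | (k+1) =>
    rw [show ((k+1:Nat) == 0) = false from by simp, Bool.false_or,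
      decide_eq_true (show 1 ≤ k+1 ∧ k+1 ≤ k+1 from by omega), Bool.true_and]

-- final table value equals wSpec
theorem RB_final (p : String) (d : List String) (i : Nat)
    (hin : i ≤ p.toList.length) :
    RB p d (p.toList.length + 1) i = wSpec p d i := by
  rw [RB]
  match i with
  | 0 => simp [wSpec]
  | (k+1) =>
    rw [show ((k+1:Nat) == 0) = false from by simp, Bool.false_or]
    rcases hw : wSpec p d (k+1) with _ | _
    · simp only [decide_eq_false_iff_not]
      rintro ⟨-, j, hj1, hj2, hj3⟩
      have := (wSpec_eq_true_iff p d k).mpr ⟨j, hj2, hj3⟩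
      rw [this] at hw; exact absurd hw (by simp)
    · simp only [decide_eq_true_eq]
      obtain ⟨j, hj1, hj2⟩ := (wSpec_eq_true_iff p d k).mp hw
      exact ⟨hin, j, by omega, hj1, hj2⟩

-- ===== VERDICT (by name: the statement is the Claim_ definition above) =====
theorem hacker_spec : Claim_equal_hacker := by
  intro p d _
  unfold Spec_hacker
  obtain ⟨a1, a2, a3⟩ := foldA_inv p d p.toList.length le_rfl
  obtain ⟨b1, b2, b3, b4⟩ := foldB_inv p d (p.toList.length + 1) le_rfl
  have hA : hacker p d =
      ((foldA p d p.toList.length).1.getD p.toList.length false,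
       (foldA p d p.toList.length).2) := rfl
  have hB : hacker_alt p d =
      ((foldB p d (p.toList.length + 1)).1.getD p.toList.length false,
       (List.range' 1 p.toList.length).filterMap (fun i =>
         if (foldB p d (p.toList.length + 1)).1.getD i false then
           some ((foldB p d (p.toList.length + 1)).2.getD i "") else none)) := rfl
  rw [hA, hB]
  refine Prod.ext ?_ ?_
  · show (foldA p d p.toList.length).1.getD p.toList.length false
      = (foldB p d (p.toList.length + 1)).1.getD p.toList.length false
    rw [a2, b3, RB_final p d _ le_rfl]
    exact edge_case_wSpec p d p.toList.length
  · show (foldA p d p.toList.length).2 = _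
    rw [a3]
    apply List.filterMap_congr
    intro i hi
    have hi' : 1 ≤ i ∧ i ≤ p.toList.length := by
      have := List.mem_range'_1.mp hi; omega
    rw [b3 i, RB_final p d i hi'.2]
    rcases hw : wSpec p d i with _ | _
    · rfl
    · rw [if_pos rfl, b4 i hi'.1 (by rw [b3 i, RB_final p d i hi'.2, hw])]
      exact (if_pos rfl).symm
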